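-- pv_equiv track=rewrite | github.com/Anushka-345/75DaysLeetCodeChallange | 3880-minimum-absolute-difference-between-two-values/3880-minimum-absolute-difference-between-two-values.py | minAbsoluteDifference
-- ===== SOURCE A (Python) =====
-- def minAbsoluteDifference(nums):
--     """
--     :type nums: List[int]
--     :rtype: int
--     """
--     last_one = -1
--     last_two = -1
--     min_diff = float('inf')
--
--     for i, val in enumerate(nums):
--         if val == 1:
--             last_one = i
--             # If we've seen a 2 before, calculate the distance
--             if last_two != -1:
--                 min_diff = min(min_diff, abs(last_one - last_two))
--
--         elif val == 2:
--             last_two = i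
--             # If we've seen a 1 before, calculate the distance
--             if last_one != -1:
--                 min_diff = min(min_diff, abs(last_two - last_one))
--
--     # If min_diff was never updated, no valid pair exists
--     return min_diff if min_diff != float('inf') else -1
-- ===== SOURCE B (Python) =====
-- def minAbsoluteDifference(nums):
--     ones = [i for i, v in enumerate(nums) if v == 1]
--     twos = [i for i, v in enumerate(nums) if v == 2]
--     if not ones or not twos:
--         return -1
--     best = None
--     i = j = 0
--     while i < len(ones) and j < len(twos):
--         d = abs(ones[i] - twos[j])
--         best = d if best is None else min(best, d)
--         if ones[i] < twos[j]:
--             i += 1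
--         else:
--             j += 1
--     return best
-- ===== Notes on version B (the rewrite author's own statement) =====
-- stated objective: alternative
-- what changed: Replaces A's single streaming pass with last-seen trackers by first collecting the sorted index lists of 1s and 2s and then running a two-pointer merge over them to find the minimum index distance.
import Mathlib
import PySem

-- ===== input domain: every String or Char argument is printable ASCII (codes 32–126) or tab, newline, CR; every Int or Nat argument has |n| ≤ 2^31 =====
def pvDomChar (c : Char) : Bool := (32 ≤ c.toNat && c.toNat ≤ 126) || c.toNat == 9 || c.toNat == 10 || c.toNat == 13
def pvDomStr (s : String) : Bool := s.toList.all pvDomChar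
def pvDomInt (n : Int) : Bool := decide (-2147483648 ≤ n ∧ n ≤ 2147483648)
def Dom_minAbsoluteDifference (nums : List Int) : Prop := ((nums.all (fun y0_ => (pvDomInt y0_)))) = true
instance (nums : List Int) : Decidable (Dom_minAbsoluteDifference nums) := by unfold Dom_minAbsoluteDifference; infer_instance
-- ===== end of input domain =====

-- B replaces A's single streaming pass (last-seen 1/2 trackers) by a two-pointer merge over the
-- collected index lists of 1s and 2s; same cost, genuinely different traversal (objective: alternative).

-- ===== PORT A =====
-- min(float('inf'), d) / the inf sentinel are modeled by Option Int: none = inf (exact: min_diff is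
-- an int whenever it was updated, and the final `!= inf` test is the none test).
def optMin (md : Option Int) (v : Int) : Option Int :=
  match md with
  | none => some v
  | some m => some (min m v)

-- one iteration of A's loop body, state (last_one, last_two, min_diff)
def stepA (s : Int × Int × Option Int) (p : Int × Int) : Int × Int × Option Int :=
  if p.2 = 1 then
    if s.2.1 ≠ -1 then (p.1, s.2.1, optMin s.2.2 |p.1 - s.2.1|)
    else (p.1, s.2.1, s.2.2)
  else if p.2 = 2 then
    if s.1 ≠ -1 then (s.1, p.1, optMin s.2.2 |p.1 - s.1|)
    else (s.1, p.1, s.2.2)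
  else s

def minAbsoluteDifference (nums : List Int) : Int :=
  let st := (PySem.List.enumerate nums).foldl stepA (-1, -1, (none : Option Int))
  match st.2.2 with
  | none => -1
  | some m => m

-- ===== PORT B =====
-- the while loop of Source B: two pointers advance by consuming the heads of the index lists
def twoPtr (os ts : List Int) (best : Option Int) : Option Int :=
  match os, ts with
  | a :: as, b :: bs =>
      let best := optMin best |a - b|
      if a < b then twoPtr as (b :: bs) best else twoPtr (a :: as) bs best
  | _, _ => best
termination_by os.length + ts.length

def minAbsoluteDifference_alt (nums : List Int) : Int :=
  let ones := ((PySem.List.enumerate nums).filter (fun p => p.2 = 1)).map Prod.fst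
  let twos := ((PySem.List.enumerate nums).filter (fun p => p.2 = 2)).map Prod.fst
  if ones.isEmpty ∨ twos.isEmpty then -1
  else (twoPtr ones twos none).getD (-1)

-- ===== PRECONDITION & SPEC =====
def Spec_minAbsoluteDifference (nums : List Int) (out : Int) : Prop := out = minAbsoluteDifference_alt nums
instance (nums : List Int) (out : Int) : Decidable (Spec_minAbsoluteDifference nums out) := by unfold Spec_minAbsoluteDifference; infer_instance

-- ===== CLAIM (what is proved, stated in full; the proofs are below) =====
def Claim_equal_minAbsoluteDifference : Prop := ∀ (nums : List Int), Dom_minAbsoluteDifference nums → Spec_minAbsoluteDifference nums (minAbsoluteDifference nums)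

-- ===== LEMMAS AND PROOFS =====

-- common spec: minimum |a - b| over all pairs, none when no pair exists
def omin : Option Int → Option Int → Option Int
  | none, y => y
  | some m, none => some m
  | some m, some k => some (min m k)

def rowMin (a : Int) (ts : List Int) : Option Int :=
  ts.foldr (fun b acc => omin (some |a - b|) acc) none

def pairsMin : List Int → List Int → Option Int
  | [], _ => none
  | a :: os, ts => omin (rowMin a ts) (pairsMin os ts)

def lastD (xs : List Int) : Int := xs.getLast?.getD (-1)

def onesOf (ps : List (Int × Int)) : List Int := (ps.filter (fun p => p.2 = 1)).map Prod.fst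
def twosOf (ps : List (Int × Int)) : List Int := (ps.filter (fun p => p.2 = 2)).map Prod.fst

theorem omin_none_right (x : Option Int) : omin x none = x := by cases x <;> rfl

theorem lastD_mem (ts : List Int) (h : ts ≠ []) : lastD ts ∈ ts := by
  simp [lastD, List.getLast?_eq_some_getLast h, List.getLast_mem]

theorem optMin_eq (md : Option Int) (v : Int) : optMin md v = omin md (some v) := by
  cases md <;> rfl

theorem omin_assoc (x y z : Option Int) : omin (omin x y) z = omin x (omin y z) := by
  cases x <;> cases y <;> cases z <;> simp [omin, min_assoc]

theorem omin_comm (x y : Option Int) : omin x y = omin y x := by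
  cases x <;> cases y <;> simp [omin, min_comm]

theorem omin_swap (x y z w : Option Int) :
    omin (omin x y) (omin z w) = omin (omin x z) (omin y w) := by
  cases x <;> cases y <;> cases z <;> cases w <;> simp [omin] <;> omega

theorem rowMin_cons (a b : Int) (bs : List Int) :
    rowMin a (b :: bs) = omin (some |a - b|) (rowMin a bs) := rfl

theorem rowMin_absorb (a v : Int) (bs : List Int) (h : ∀ b ∈ bs, v ≤ |a - b|) :
    omin (some v) (rowMin a bs) = some v := by
  induction bs with
  | nil => rfl
  | cons b bs ih =>
      rw [rowMin_cons, ← omin_assoc, omin_comm (some v) (some |a - b|), omin_assoc,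
        ih (fun x hx => h x (List.mem_cons_of_mem _ hx))]
      simp [omin, min_eq_right (h b (List.mem_cons_self ..))]

theorem rowMin_append (a i : Int) (ts : List Int) :
    rowMin a (ts ++ [i]) = omin (rowMin a ts) (some |a - i|) := by
  induction ts with
  | nil => rfl
  | cons b bs ih => rw [List.cons_append, rowMin_cons, ih, rowMin_cons, omin_assoc]

theorem pairsMin_nil_right (os : List Int) : pairsMin os [] = none := by
  induction os with
  | nil => rfl
  | cons a os ih => simp [pairsMin, rowMin, ih, omin]

theorem pairsMin_append_left (os : List Int) (i : Int) (ts : List Int) :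
    pairsMin (os ++ [i]) ts = omin (pairsMin os ts) (rowMin i ts) := by
  induction os with
  | nil => simp only [List.nil_append, pairsMin]; rw [omin_none_right]; rfl
  | cons a os ih => simp [pairsMin, ih, omin_assoc]

theorem pairsMin_append_right (os : List Int) (ts : List Int) (i : Int) :
    pairsMin os (ts ++ [i]) = omin (pairsMin os ts) (rowMin i os) := by
  induction os with
  | nil => rfl
  | cons a os ih =>
      simp only [pairsMin, ih, rowMin_append, rowMin_cons]
      rw [omin_swap, abs_sub_comm i a]

theorem rowMin_last (i : Int) (ts : List Int) (hne : ts ≠ [])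
    (hsort : ts.Pairwise (· < ·)) (hlt : ∀ b ∈ ts, b < i) :
    rowMin i ts = some (i - lastD ts) := by
  induction ts with
  | nil => exact absurd rfl hne
  | cons b bs ih =>
      cases bs with
      | nil =>
          have : |i - b| = i - b := abs_of_pos (by have := hlt b (List.mem_cons_self ..); omega)
          simp [rowMin, omin, lastD, this]
      | cons c cs =>
          have hsort' := (List.pairwise_cons.mp hsort).2
          have hblt : ∀ x ∈ c :: cs, b < x := (List.pairwise_cons.mp hsort).1
          have hlast : lastD (c :: cs) ∈ c :: cs := lastD_mem _ (by simp)
          rw [rowMin_cons, ih (by simp) hsort' (fun x hx => hlt x (List.mem_cons_of_mem _ hx))]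
          have h1 : |i - b| = i - b := abs_of_pos (by have := hlt b (List.mem_cons_self ..); omega)
          have h2 : b < lastD (c :: cs) := hblt _ hlast
          have : lastD (b :: c :: cs) = lastD (c :: cs) := by simp [lastD]
          rw [this, h1]
          simp [omin, min_eq_right (by omega : i - lastD (c :: cs) ≤ i - b)]

theorem rowMin_isSome (a : Int) (ts : List Int) (h : ts ≠ []) : (rowMin a ts).isSome := by
  cases ts with
  | nil => exact absurd rfl h
  | cons b bs => rw [rowMin_cons]; cases rowMin a bs <;> simp [omin]

theorem pairsMin_isSome (os ts : List Int) (ho : os ≠ []) (ht : ts ≠ []) :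
    (pairsMin os ts).isSome := by
  cases os with
  | nil => exact absurd rfl ho
  | cons a os =>
      have := rowMin_isSome a ts ht
      simp only [pairsMin]
      cases hr : rowMin a ts with
      | none => rw [hr] at this; simp at this
      | some m => cases pairsMin os ts <;> simp [omin]

theorem lastD_append (os : List Int) (i : Int) : lastD (os ++ [i]) = i := by
  simp [lastD]

theorem lastD_ne_neg_one (ts : List Int) (hpos : ∀ x ∈ ts, 0 ≤ x) (h : ts ≠ []) :
    lastD ts ≠ -1 := by
  have := hpos _ (lastD_mem ts h)
  omega

theorem lastD_lt (ts : List Int) (i : Int) (h : ts ≠ []) (hlt : ∀ b ∈ ts, b < i) :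
    lastD ts < i := by
  exact hlt _ (lastD_mem ts h)

theorem pairwise_append_singleton (os : List Int) (i : Int)
    (h : os.Pairwise (· < ·)) (hi : ∀ x ∈ os, x < i) : (os ++ [i]).Pairwise (· < ·) := by
  rw [List.pairwise_append]
  exact ⟨h, List.pairwise_singleton _ _, fun a ha b hb => by simp at hb; subst hb; exact hi a ha⟩

-- invariant of A's fold: the state is (last 1-index, last 2-index, min over all pairs so far)
theorem foldA_inv (ps : List (Int × Int)) : ∀ (os ts : List Int),
    (∀ x ∈ os, 0 ≤ x) → (∀ x ∈ ts, 0 ≤ x) →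
    (∀ p ∈ ps, 0 ≤ p.1) →
    (∀ p ∈ ps, ∀ x ∈ os, x < p.1) → (∀ p ∈ ps, ∀ x ∈ ts, x < p.1) →
    ps.Pairwise (fun p q => p.1 < q.1) →
    os.Pairwise (· < ·) → ts.Pairwise (· < ·) →
    ps.foldl stepA (lastD os, lastD ts, pairsMin os ts)
      = (lastD (os ++ onesOf ps), lastD (ts ++ twosOf ps), pairsMin (os ++ onesOf ps) (ts ++ twosOf ps)) := by
  induction ps with
  | nil => intro os ts _ _ _ _ _ _ _ _; simp [onesOf, twosOf]
  | cons p ps ih =>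
      intro os ts hosPos htsPos hpPos hosLt htsLt hSort hosSort htsSort
      have hpPos' : ∀ q ∈ ps, 0 ≤ q.1 := fun q hq => hpPos q (List.mem_cons_of_mem _ hq)
      have hFut : ∀ q ∈ ps, p.1 < q.1 := (List.pairwise_cons.mp hSort).1
      have hSort' := (List.pairwise_cons.mp hSort).2
      by_cases h1 : p.2 = 1
      · -- a 1 at index p.1
        have hstep : stepA (lastD os, lastD ts, pairsMin os ts) p
            = (p.1, lastD ts, pairsMin (os ++ [p.1]) ts) := by
          by_cases hts : ts = []
          · subst hts
            simp [stepA, h1, lastD, pairsMin_nil_right]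
          · have hne := lastD_ne_neg_one ts htsPos hts
            have hlt : ∀ b ∈ ts, b < p.1 := htsLt p (List.mem_cons_self ..)
            have habs : |p.1 - lastD ts| = p.1 - lastD ts :=
              abs_of_pos (by have := lastD_lt ts p.1 hts hlt; omega)
            simp [stepA, h1, hne, optMin_eq, habs,
              pairsMin_append_left, rowMin_last p.1 ts hts htsSort hlt]
        have hones : onesOf (p :: ps) = p.1 :: onesOf ps := by
          simp [onesOf, List.filter_cons, h1]
        have htwos : twosOf (p :: ps) = twosOf ps := by
          simp [twosOf, List.filter_cons, h1]
        rw [List.foldl_cons, hstep]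
        have := ih (os ++ [p.1]) ts
          (by intro x hx; rcases List.mem_append.mp hx with h | h
              · exact hosPos x h
              · simp at h; subst h; exact hpPos p (List.mem_cons_self ..))
          htsPos hpPos'
          (by intro q hq x hx; rcases List.mem_append.mp hx with h | h
              · exact hosLt q (List.mem_cons_of_mem _ hq) x h
              · simp at h; subst h; exact hFut q hq)
          (fun q hq => htsLt q (List.mem_cons_of_mem _ hq))
          hSort'
          (pairwise_append_singleton os p.1 hosSort (hosLt p (List.mem_cons_self ..)))
          htsSort
        rw [lastD_append] at this
        rw [this, hones, htwos]
        simp [List.append_assoc]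
      · by_cases h2 : p.2 = 2
        · -- a 2 at index p.1
          have hstep : stepA (lastD os, lastD ts, pairsMin os ts)  p
              = (lastD os, p.1, pairsMin os (ts ++ [p.1])) := by
            by_cases hos : os = []
            · subst hos
              simp [stepA, h1, h2, lastD, pairsMin, pairsMin_append_right, rowMin, omin_none_right]
            · have hne := lastD_ne_neg_one os hosPos hos
              have hlt : ∀ b ∈ os, b < p.1 := hosLt p (List.mem_cons_self ..)
              have habs : |p.1 - lastD os| = p.1 - lastD os :=
                abs_of_pos (by have := lastD_lt os p.1 hos hlt; omega)
              simp [stepA, h1, h2, hne, optMin_eq, habs,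
                pairsMin_append_right, rowMin_last p.1 os hos hosSort hlt]
          have hones : onesOf (p :: ps) = onesOf ps := by
            simp [onesOf, List.filter_cons, h1]
          have htwos : twosOf (p :: ps) = p.1 :: twosOf ps := by
            simp [twosOf, List.filter_cons, h2]
          rw [List.foldl_cons, hstep]
          have := ih os (ts ++ [p.1])
            hosPos
            (by intro x hx; rcases List.mem_append.mp hx with h | h
                · exact htsPos x h
                · simp at h; subst h; exact hpPos p (List.mem_cons_self ..))
            hpPos'
            (fun q hq => hosLt q (List.mem_cons_of_mem _ hq))
            (by intro q hq x hx; rcases List.mem_append.mp hx with h | h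
                · exact htsLt q (List.mem_cons_of_mem _ hq) x h
                · simp at h; subst h; exact hFut q hq)
            hSort'
            hosSort
            (pairwise_append_singleton ts p.1 htsSort (htsLt p (List.mem_cons_self ..)))
          rw [lastD_append] at this
          rw [this, hones, htwos]
          simp [List.append_assoc]
        · -- neither 1 nor 2
          have hstep : stepA (lastD os, lastD ts, pairsMin os ts) p
              = (lastD os, lastD ts, pairsMin os ts) := by
            simp [stepA, h1, h2]
          have hones : onesOf (p :: ps) = onesOf ps := by
            simp [onesOf, List.filter_cons, h1]
          have htwos : twosOf (p :: ps) = twosOf ps := by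
            simp [twosOf, List.filter_cons, h2]
          rw [List.foldl_cons, hstep, hones, htwos]
          exact ih os ts hosPos htsPos hpPos'
            (fun q hq => hosLt q (List.mem_cons_of_mem _ hq))
            (fun q hq => htsLt q (List.mem_cons_of_mem _ hq))
            hSort' hosSort htsSort

theorem pairsMin_cons_right (os : List Int) (b : Int) (bs : List Int) :
    pairsMin os (b :: bs) = omin (rowMin b os) (pairsMin os bs) := by
  induction os with
  | nil => rfl
  | cons a os ih =>
      simp only [pairsMin, rowMin_cons, ih]
      rw [omin_swap, abs_sub_comm a b]

-- the two-pointer merge computes the pairwise minimum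
theorem twoPtr_eq : ∀ (n : Nat) (os ts : List Int), os.length + ts.length ≤ n →
    os.Pairwise (· < ·) → ts.Pairwise (· < ·) → ∀ best,
    twoPtr os ts best = omin best (pairsMin os ts) := by
  intro n
  induction n with
  | zero =>
      intro os ts hlen _ _ best
      have : os = [] := by cases os <;> simp_all
      subst this
      simp [twoPtr, pairsMin, omin_none_right]
  | succ n ih =>
      intro os ts hlen hos hts best
      match os, ts with
      | [], ts => simp [twoPtr, pairsMin, omin_none_right]
      | a :: as, [] => simp [twoPtr, pairsMin_nil_right, omin_none_right]

      | a :: as, b :: bs =>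
          have hos' := (List.pairwise_cons.mp hos).2
          have hts' := (List.pairwise_cons.mp hts).2
          by_cases hab : a < b
          · have hrow : rowMin a (b :: bs) = some |a - b| := by
              rw [rowMin_cons]
              exact rowMin_absorb a |a - b| bs (by
                intro b' hb'
                have hb : b < b' := (List.pairwise_cons.mp hts).1 b' hb'
                have h1 : |a - b| = b - a := by rw [abs_sub_comm]; exact abs_of_pos (by omega)
                have h2 : |a - b'| = b' - a := by rw [abs_sub_comm]; exact abs_of_pos (by omega)
                omega)
            have hM : pairsMin (a :: as) (b :: bs)
                = omin (some |a - b|) (pairsMin as (b :: bs)) := by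
              simp only [pairsMin, hrow]
            simp only [twoPtr]
            rw [if_pos hab,
              ih as (b :: bs) (by simp at hlen ⊢; omega) hos' hts (optMin best |a - b|),
              optMin_eq, hM, omin_assoc]
          · have hrow : rowMin b (a :: as) = some |b - a| := by
              rw [rowMin_cons]
              exact rowMin_absorb b |b - a| as (by
                intro a' ha'
                have ha : a < a' := (List.pairwise_cons.mp hos).1 a' ha'
                have hba : b ≤ a := by omega
                have h1 : |b - a| = a - b := by rw [abs_sub_comm]; exact abs_of_nonneg (by omega)
                have h2 : |b - a'| = a' - b := by rw [abs_sub_comm]; exact abs_of_nonneg (by omega)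
                omega)
            have hM : pairsMin (a :: as) (b :: bs)
                = omin (some |b - a|) (pairsMin (a :: as) bs) := by
              rw [pairsMin_cons_right, hrow]
            simp only [twoPtr]
            rw [if_neg hab,
              ih (a :: as) bs (by simp at hlen ⊢; omega) hos hts' (optMin best |a - b|),
              optMin_eq, hM, omin_assoc, abs_sub_comm a b]

theorem enum_fst_nonneg (nums : List Int) : ∀ p ∈ PySem.List.enumerate nums, (0:Int) ≤ p.1 := by
  intro p hp
  rcases (PySem.List.mem_enumerate_iff _ _ _).mp hp with ⟨k, hk, rfl⟩
  simp

theorem ones_sorted (nums : List Int) :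
    (((PySem.List.enumerate nums).filter (fun p => p.2 = 1)).map Prod.fst).Pairwise (· < ·) := by
  rw [List.pairwise_map]
  exact (PySem.List.pairwise_lt_enumerate nums 0).filter _

theorem twos_sorted (nums : List Int) :
    (((PySem.List.enumerate nums).filter (fun p => p.2 = 2)).map Prod.fst).Pairwise (· < ·) := by
  rw [List.pairwise_map]
  exact (PySem.List.pairwise_lt_enumerate nums 0).filter _

-- ===== VERDICT (by name: the statement is the Claim_ definition above) =====
theorem minAbsoluteDifference_spec : Claim_equal_minAbsoluteDifference := by
  intro nums _
  unfold Spec_minAbsoluteDifference minAbsoluteDifference minAbsoluteDifference_alt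
  have hfold := foldA_inv (PySem.List.enumerate nums) [] []
    (by simp) (by simp) (enum_fst_nonneg nums)
    (by simp) (by simp)
    (PySem.List.pairwise_lt_enumerate nums 0)
    (List.Pairwise.nil) (List.Pairwise.nil)
  simp only [List.nil_append] at hfold
  have hlast : lastD ([] : List Int) = -1 := rfl
  have hpm0 : pairsMin ([] : List Int) [] = none := rfl
  rw [hlast, hpm0] at hfold
  set ones := ((PySem.List.enumerate nums).filter (fun p => p.2 = 1)).map Prod.fst with hones
  set twos := ((PySem.List.enumerate nums).filter (fun p => p.2 = 2)).map Prod.fst with htwos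
  have honesOf : onesOf (PySem.List.enumerate nums) = ones := rfl
  have htwosOf : twosOf (PySem.List.enumerate nums) = twos := rfl
  rw [honesOf, htwosOf] at hfold
  rw [hfold]
  by_cases hE : ones.isEmpty ∨ twos.isEmpty
  · have hnone : pairsMin ones twos = none := by
      rcases hE with h | h
      · rw [List.isEmpty_iff.mp h]; rfl
      · rw [List.isEmpty_iff.mp h]; exact pairsMin_nil_right ones
    rw [hnone, if_pos hE]
  · push_neg at hE
    have ho : ones ≠ [] := by
      intro h; exact hE.1 (by simp [h])
    have ht : twos ≠ [] := by
      intro h; exact hE.2 (by simp [h])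
    have hsome := pairsMin_isSome ones twos ho ht
    have h2p := twoPtr_eq (ones.length + twos.length) ones twos le_rfl
      (ones_sorted nums) (twos_sorted nums) none
    have homn : omin none (pairsMin ones twos) = pairsMin ones twos := rfl
    rw [homn] at h2p
    rw [if_neg (by simp [hE.1, hE.2]), h2p]
    cases hpm : pairsMin ones twos with
    | none => rw [hpm] at hsome; simp at hsome
    | some m => simp
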